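-- pv_equiv track=rewrite | github.com/toheed-techlogix/R-TIE | src/parsing/literals.py | _find_enclosing_open_paren
-- ===== SOURCE A (Python) =====
-- def _find_enclosing_open_paren(text: str, lit_start: int) -> int | None:
--     """Walk backwards from *lit_start* and return the index of the nearest
--     unmatched ``(``, or ``None`` if there is no enclosing paren.
--
--     "Unmatched" means the depth is 0 *relative to lit_start* — i.e. the
--     paren opens a scope that the literal currently sits inside. The walk
--     stops at index 0 if no such paren is found.
--     """
--     depth = 0
--     i = lit_start - 1
--     while i >= 0:
--         c = text[i]
--         if c == ")":
--             depth += 1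
--         elif c == "(":
--             if depth == 0:
--                 return i
--             depth -= 1
--         i -= 1
--     return None
-- ===== SOURCE B (Python) =====
-- def _find_enclosing_open_paren(text: str, lit_start: int) -> int | None:
--     stack = []
--     for i in range(min(lit_start, len(text))):
--         c = text[i]
--         if c == "(":
--             stack.append(i)
--         elif c == ")":
--             if stack:
--                 stack.pop()
--     return stack[-1] if stack else None
-- ===== Notes on version B (the rewrite author's own statement) =====
-- stated objective: idiomatic
-- what changed: Replaced the backward depth-counting walk with a forward scan over the prefix that maintains a stack of open-paren indices; the stack top is the nearest unmatched enclosing paren.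
-- crash fix: On lit_start > len(text) A raises IndexError while B (which clamps the scanned prefix to the text length) returns the stack-top result for the whole text. — e.g. on _find_enclosing_open_paren("((", 5): A raises IndexError, B returns some 1
import Mathlib
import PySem

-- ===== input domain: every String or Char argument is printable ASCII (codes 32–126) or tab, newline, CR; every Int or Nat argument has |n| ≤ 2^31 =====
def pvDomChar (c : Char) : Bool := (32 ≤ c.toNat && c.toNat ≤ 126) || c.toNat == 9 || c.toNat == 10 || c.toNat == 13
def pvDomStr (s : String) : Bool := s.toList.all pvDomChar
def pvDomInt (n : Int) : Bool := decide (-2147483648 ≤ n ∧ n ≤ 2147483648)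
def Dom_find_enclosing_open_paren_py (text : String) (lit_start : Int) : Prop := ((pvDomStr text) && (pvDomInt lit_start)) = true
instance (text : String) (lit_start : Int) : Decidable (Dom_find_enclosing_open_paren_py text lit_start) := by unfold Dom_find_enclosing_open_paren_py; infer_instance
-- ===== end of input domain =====

-- B replaces A's backward depth-counting walk by a forward scan keeping a stack of open-paren indices (idiomatic; same cost).

-- ===== PORT A =====
-- A's while-loop: walk i from lit_start-1 down to 0, tracking depth.
def pvALoop (cs : List Char) (depth : Int) (i : Int) : Option Int :=
  if _h : 0 ≤ i then
    match PySem.List.pyGet? cs i with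
    | none => none   -- Python raises IndexError here; excluded by Pre_
    | some c =>
      if c = ')' then pvALoop cs (depth + 1) (i - 1)
      else if c = '(' then
        (if depth = 0 then some i else pvALoop cs (depth - 1) (i - 1))
      else pvALoop cs depth (i - 1)
  else none
termination_by (i + 1).toNat
decreasing_by all_goals omega

def find_enclosing_open_paren_py (text : String) (lit_start : Int) : Option Int :=
  pvALoop text.toList 0 (lit_start - 1)

-- ===== PORT B =====
def find_enclosing_open_paren_py_alt (text : String) (lit_start : Int) : Option Int :=
  let cs := text.toList
  let st := (PySem.List.pyRange 0 (min lit_start (cs.length : Int)) 1).foldl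
    (fun st i =>
      let c := PySem.List.pyGetD cs i ' '
      if c = '(' then st ++ [i]
      else if c = ')' then (if st = [] then st else st.dropLast)
      else st) []
  st.getLast?

-- ===== PRECONDITION & SPEC =====
-- Pre_ excludes exactly lit_start > len(text), where A's text[i] raises IndexError.
def Pre_find_enclosing_open_paren_py (text : String) (lit_start : Int) : Prop :=
  lit_start ≤ (text.toList.length : Int)
instance (text : String) (lit_start : Int) : Decidable (Pre_find_enclosing_open_paren_py text lit_start) := by
  unfold Pre_find_enclosing_open_paren_py; infer_instance

def pvWitness_find_enclosing_open_paren_py : String × Int := ("(a)b", 2)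

-- On lit_start > len(text) A raises IndexError while B clamps the scanned prefix to the text and returns its stack-top result.
def Raises_find_enclosing_open_paren_py (text : String) (lit_start : Int) : Prop :=
  (text.toList.length : Int) < lit_start
instance (text : String) (lit_start : Int) : Decidable (Raises_find_enclosing_open_paren_py text lit_start) := by
  unfold Raises_find_enclosing_open_paren_py; infer_instance
def pvRaiseWitness_find_enclosing_open_paren_py : String × Int := ("((", 5)
def pvRaiseWitnessOut_find_enclosing_open_paren_py : Option Int := some 1

def Spec_find_enclosing_open_paren_py (text : String) (lit_start : Int) (out : Option Int) : Prop :=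
  out = find_enclosing_open_paren_py_alt text lit_start
instance (text : String) (lit_start : Int) (out : Option Int) : Decidable (Spec_find_enclosing_open_paren_py text lit_start out) := by
  unfold Spec_find_enclosing_open_paren_py; infer_instance

-- ===== CLAIM (what is proved, stated in full; the proofs are below) =====
def Claim_equal_find_enclosing_open_paren_py : Prop := ∀ (text : String) (lit_start : Int), Dom_find_enclosing_open_paren_py text lit_start → Pre_find_enclosing_open_paren_py text lit_start → Spec_find_enclosing_open_paren_py text lit_start (find_enclosing_open_paren_py text lit_start)
def Claim_raises_find_enclosing_open_paren_py : Prop := (∀ (text : String) (lit_start : Int), Dom_find_enclosing_open_paren_py text lit_start → Raises_find_enclosing_open_paren_py text lit_start → ¬ Pre_find_enclosing_open_paren_py text lit_start) ∧ (Dom_find_enclosing_open_paren_py (pvRaiseWitness_find_enclosing_open_paren_py.1) (pvRaiseWitness_find_enclosing_open_paren_py.2) ∧ Raises_find_enclosing_open_paren_py (pvRaiseWitness_find_enclosing_open_paren_py.1) (pvRaiseWitness_find_enclosing_open_paren_py.2) ∧ find_enclosing_open_paren_py_alt (pvRaiseWitness_find_enclosing_open_paren_py.1) (pvRaiseWitness_find_enclosing_open_paren_py.2)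 = pvRaiseWitnessOut_find_enclosing_open_paren_py)

-- ===== LEMMAS AND PROOFS =====

-- proof helpers: the indexed prefix of cs up to n, B's fold step, and A's walk re-read right-to-left
def pvPref (cs : List Char) : Nat → List (Int × Char)
  | 0 => []
  | n + 1 => pvPref cs n ++ [((n : Int), cs.getD n ' ')]

def pvStep (st : List Int) : Int × Char → List Int
  | (i, c) =>
    if c = '(' then st ++ [i]
    else if c = ')' then (if st = [] then st else st.dropLast)
    else st

def pvBwd : List (Int × Char) → Nat → Option Int
  | [], _ => none
  | (i, c) :: rest, d =>
    if c = ')' then pvBwd rest (d + 1)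
    else if c = '(' then (if d = 0 then some i else pvBwd rest (d - 1))
    else pvBwd rest d

lemma pvBwd_eq_get (ps : List (Int × Char)) :
    ∀ d : Nat, pvBwd ps.reverse d = ((ps.foldl pvStep []).reverse)[d]? := by
  induction ps using List.reverseRecOn with
  | nil => intro d; simp [pvBwd]
  | append_singleton qs p ih =>
    intro d
    obtain ⟨i, c⟩ := p
    rw [List.reverse_append, List.foldl_append]
    simp only [List.reverse_singleton, List.singleton_append, List.foldl_cons, List.foldl_nil]
    simp only [pvBwd, pvStep]
    by_cases h1 : c = ')'
    · have h2 : ¬ c = '(' := by subst h1; decide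
      rw [if_pos h1, if_neg h2, if_pos h1, ih (d + 1)]
      by_cases hs : qs.foldl pvStep [] = []
      · simp [hs]
      · rw [if_neg hs, ← List.tail_reverse, List.getElem?_tail]
    · by_cases h2 : c = '('
      · rw [if_neg h1, if_pos h2, if_pos h2, List.reverse_append, List.reverse_singleton,
          List.singleton_append]
        cases d with
        | zero => simp
        | succ k =>
          rw [if_neg (Nat.succ_ne_zero k), List.getElem?_cons_succ]
          simpa using ih k
      · rw [if_neg h1, if_neg h2, if_neg h2, if_neg h1, ih d]

lemma pvALoop_eq_bwd (cs : List Char) :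
    ∀ n : Nat, n ≤ cs.length → ∀ d : Nat,
      pvALoop cs (d : Int) ((n : Int) - 1) = pvBwd (pvPref cs n).reverse d := by
  intro n
  induction n with
  | zero => intro _ d; rw [pvALoop]; simp [pvPref, pvBwd]
  | succ m ih =>
    intro hle d
    have hm : m < cs.length := by omega
    have hget : PySem.List.pyGet? cs (m : Int) = some (cs.getD m ' ') := by
      simp [PySem.List.pyGet?, PySem.List.pyIdx?, hm, List.getD]
    have hpref : (pvPref cs (m + 1)).reverse = ((m : Int), cs.getD m ' ') :: (pvPref cs m).reverse := by
      simp [pvPref]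
    have hcast : ((m + 1 : Nat) : Int) - 1 = (m : Int) := by push_cast; ring
    rw [hcast, pvALoop, dif_pos (by omega : (0:Int) ≤ (m : Int)), hget, hpref]
    simp only [pvBwd]
    by_cases h1 : cs.getD m ' ' = ')'
    · rw [if_pos h1, if_pos h1, show (d : Int) + 1 = ((d + 1 : Nat) : Int) by push_cast; ring,
        ih (by omega) (d + 1)]
    · by_cases h2 : cs.getD m ' ' = '('
      · rw [if_neg h1, if_neg h1, if_pos h2, if_pos h2]
        by_cases hd : d = 0
        · subst hd; simp
        · rw [if_neg (show ¬((d : Int) = 0) by exact_mod_cast hd), if_neg hd,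
            show (d : Int) - 1 = ((d - 1 : Nat) : Int) by omega, ih (by omega) (d - 1)]
      · rw [if_neg h1, if_neg h1, if_neg h2, if_neg h2, ih (by omega) d]

lemma pvFold_eq (cs : List Char) (n : Nat) :
    (PySem.List.pyRange 0 (n : Int) 1).foldl
      (fun st i =>
        let c := PySem.List.pyGetD cs i ' '
        if c = '(' then st ++ [i]
        else if c = ')' then (if st = [] then st else st.dropLast)
        else st) []
      = (pvPref cs n).foldl pvStep [] := by
  induction n with
  | zero => simp [pvPref]
  | succ m ih =>
    have hr : PySem.List.pyRange 0 ((m + 1 : Nat) : Int) 1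
        = PySem.List.pyRange 0 (m : Int) 1 ++ [(m : Int)] := by
      have := PySem.List.pyRange_one_succ_right (a := 0) (b := (m : Int)) (by omega)
      simpa using this
    rw [hr, List.foldl_append, ih]
    simp [pvPref, pvStep, PySem.List.pyGetD_natCast]

-- ===== VERDICT (by name: the statement is the Claim_ definition above) =====
theorem find_enclosing_open_paren_py_spec : Claim_equal_find_enclosing_open_paren_py := by
  intro text lit_start _hdom hpre
  unfold Spec_find_enclosing_open_paren_py
  unfold Pre_find_enclosing_open_paren_py at hpre
  have halt : find_enclosing_open_paren_py_alt text lit_start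
      = ((PySem.List.pyRange 0 (min lit_start (text.toList.length : Int)) 1).foldl
          (fun st i =>
            let c := PySem.List.pyGetD text.toList i ' '
            if c = '(' then st ++ [i]
            else if c = ')' then (if st = [] then st else st.dropLast)
            else st) []).getLast? := rfl
  rw [halt, min_eq_left hpre]
  unfold find_enclosing_open_paren_py
  by_cases hneg : lit_start ≤ 0
  · rw [PySem.List.pyRange_one_eq_nil hneg, pvALoop, dif_neg (by omega)]
    rfl
  · obtain ⟨n, rfl⟩ : ∃ n : Nat, lit_start = (n : Int) := ⟨lit_start.toNat, by omega⟩
    have hle : n ≤ text.toList.length := by exact_mod_cast hpre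
    rw [pvFold_eq text.toList n]
    have h0 := pvALoop_eq_bwd text.toList n hle 0
    simp only [Nat.cast_zero] at h0
    rw [h0, pvBwd_eq_get (pvPref text.toList n) 0, ← List.head?_eq_getElem?, List.head?_reverse]

theorem find_enclosing_open_paren_py_raises : Claim_raises_find_enclosing_open_paren_py := by
  unfold Claim_raises_find_enclosing_open_paren_py
  constructor
  · intro text lit_start _ hr hp
    unfold Raises_find_enclosing_open_paren_py at hr
    unfold Pre_find_enclosing_open_paren_py at hp
    omega
  · exact ⟨by decide, by decide, by decide⟩

-- self-check: B's port really returns the stated value at the raise witness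
theorem pvRaiseWitness_ok :
    find_enclosing_open_paren_py_alt pvRaiseWitness_find_enclosing_open_paren_py.1
      pvRaiseWitness_find_enclosing_open_paren_py.2 = pvRaiseWitnessOut_find_enclosing_open_paren_py :=
  find_enclosing_open_paren_py_raises.2.2.2
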